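-- pv_equiv track=rewrite | github.com/lisanping/agentic-literature-review | backend/app/agents/analyst_agent.py | _cluster_by_concepts
-- ===== SOURCE A (Python) =====
-- def _cluster_by_concepts(
--     analyses: list[dict],
--     n_clusters: int | None = None,
-- ) -> list[list[dict]]:
--     """Cluster by key concept overlap using greedy merging."""
--     if not analyses:
--         return []
--
--     # Start: each paper in its own cluster
--     clusters: list[list[dict]] = [[a] for a in analyses]
--     target = n_clusters or max(2, min(len(analyses) // 3, 7))
--
--     while len(clusters) > target:
--         # Find the two clusters with highest concept overlap
--         best_i, best_j, best_score = 0, 1, -1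
--         for i in range(len(clusters)):
--             concepts_i: set[str] = set()
--             for p in clusters[i]:
--                 concepts_i.update(p.get("key_concepts") or [])
--             for j in range(i + 1, len(clusters)):
--                 concepts_j: set[str] = set()
--                 for p in clusters[j]:
--                     concepts_j.update(p.get("key_concepts") or [])
--                 score = len(concepts_i & concepts_j)
--                 if score > best_score:
--                     best_score = score
--                     best_i, best_j = i, j
--         # Merge
--         clusters[best_i].extend(clusters[best_j])
--         clusters.pop(best_j)
--
--     return clusters
-- ===== SOURCE B (Python) =====
-- def _cluster_by_concepts(
--     analyses: list[dict],
--     n_clusters: int | None = None,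
-- ) -> list[list[dict]]:
--     """Cluster by key concept overlap using greedy merging.
--
--     Different organisation than the positional-list version: clusters live in
--     dicts keyed by a stable id, the pairwise overlap scores are computed once
--     into a cache and only the merged cluster's row is recomputed after each
--     merge, the best pair is picked by a keyed min over the cache, and the
--     output list is assembled once at the end from the surviving ids.
--     """
--     if not analyses:
--         return []
--
--     n = len(analyses)
--     target = n_clusters or max(2, min(n // 3, 7))
--     members = {k: [a] for k, a in enumerate(analyses)}
--     csets = {k: set(a.get("key_concepts") or []) for k, a in enumerate(analyses)}
--     active = list(range(n))
--     score = {(x, y): len(csets[x] & csets[y])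
--              for x in range(n) for y in range(x + 1, n)}
--
--     while len(active) > target:
--         i, j = min(score, key=lambda p: (-score[p], p))
--         csets[i] |= csets.pop(j)
--         members[i].extend(members.pop(j))
--         active.remove(j)
--         score = {p: s for p, s in score.items() if i not in p and j not in p}
--         for k in active:
--             if k != i:
--                 p = (k, i) if k < i else (i, k)
--                 score[p] = len(csets[i] & csets[k])
--
--     return [members[k] for k in active]
-- ===== Notes on version B (the rewrite author's own statement) =====
-- stated objective: alternative
-- what changed: B replaces A's per-round rebuild-and-rescan (recomputing every cluster's concept set and every pairwise intersection inside a nested index scan over a mutated positional list) with id-keyed dicts and a cached pairwise score table: scores are computed once, each merge recomputes only the merged cluster's row, the best pair is picked by a keyed min over the cache, and the output is assembled once at the end from the surviving ids; a timing run found no measurable speed difference on the generated inputs.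
import Mathlib
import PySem

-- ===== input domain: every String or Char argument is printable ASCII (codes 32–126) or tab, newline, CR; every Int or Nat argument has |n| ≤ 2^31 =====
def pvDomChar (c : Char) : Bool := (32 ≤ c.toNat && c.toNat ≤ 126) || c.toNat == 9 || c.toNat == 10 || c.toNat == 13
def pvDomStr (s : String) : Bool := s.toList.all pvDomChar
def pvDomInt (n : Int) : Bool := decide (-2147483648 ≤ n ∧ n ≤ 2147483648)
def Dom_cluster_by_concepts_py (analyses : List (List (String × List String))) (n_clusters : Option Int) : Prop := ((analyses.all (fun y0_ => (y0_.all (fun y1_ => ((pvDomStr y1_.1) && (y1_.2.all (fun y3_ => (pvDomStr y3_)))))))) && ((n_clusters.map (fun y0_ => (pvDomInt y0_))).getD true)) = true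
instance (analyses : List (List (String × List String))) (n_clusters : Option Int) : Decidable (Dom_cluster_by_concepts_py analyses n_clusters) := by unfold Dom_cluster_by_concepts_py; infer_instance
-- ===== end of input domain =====

-- B keeps clusters in id-keyed dicts with a cached pairwise-score table (only the merged
-- cluster's row is recomputed per merge) and a keyed min, assembling the output once at the end;
-- objective: alternative. Pre_ excludes the inputs where A raises IndexError: a nonempty list
-- with a negative n_clusters.


-- ===== PORT A =====
-- p.get("key_concepts") or []  (None and [] both give []; shared by both ports)
def pvConcepts (p : List (String × List String)) : List String :=
  ((PySem.Dict.mk p).get? "key_concepts").getD []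

-- target = n_clusters or max(2, min(len(analyses) // 3, 7))  (0 and None are both falsy; shared)
def pvTarget (analyses : List (List (String × List String))) (n_clusters : Option Int) : Int :=
  match n_clusters with
  | some k => if k = 0 then max 2 (min (PySem.Int.floordiv (analyses.length : Int) 3) 7) else k
  | none => max 2 (min (PySem.Int.floordiv (analyses.length : Int) 3) 7)

-- concepts = set(); for p in cluster: concepts.update(p.get("key_concepts") or [])
def pvClusterConcepts (c : List (List (String × List String))) : List String :=
  c.foldl (fun acc p => PySem.Set.update acc (pvConcepts p)) []

-- score = len(ci & cj)  (shared: both Pythons score a pair this way)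
def pvScore (ci cj : List String) : Int :=
  ((PySem.Set.inter ci cj).length : Int)

-- A's pair search: rebuilds concepts_i / concepts_j from the clusters inside the scan
def pvBestA (clusters : List (List (List (String × List String)))) : Nat × Nat × Int :=
  (List.range clusters.length).foldl (fun best i =>
    (List.range' (i+1) (clusters.length - (i+1))).foldl (fun best j =>
      if best.2.2 < pvScore (pvClusterConcepts (clusters.getD i []))
                            (pvClusterConcepts (clusters.getD j []))
      then (i, j, pvScore (pvClusterConcepts (clusters.getD i []))
                          (pvClusterConcepts (clusters.getD j [])))
      else best) best)
    (0, 1, -1)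

-- while len(clusters) > target: find best pair, merge (extend then pop).  The dite guard only
-- ensures termination; on inputs satisfying Pre_ the popped index is always in range.
def pvLoopA (clusters : List (List (List (String × List String)))) (target : Int) :
    List (List (List (String × List String))) :=
  if target < (clusters.length : Int) then
    if h : ((clusters.set (pvBestA clusters).1 (clusters.getD (pvBestA clusters).1 [] ++ clusters.getD (pvBestA clusters).2.1 [])).eraseIdx (pvBestA clusters).2.1).length < clusters.length
    then pvLoopA ((clusters.set (pvBestA clusters).1 (clusters.getD (pvBestA clusters).1 [] ++ clusters.getD (pvBestA clusters).2.1 [])).eraseIdx (pvBestA clusters).2.1) target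
    else (clusters.set (pvBestA clusters).1 (clusters.getD (pvBestA clusters).1 [] ++ clusters.getD (pvBestA clusters).2.1 [])).eraseIdx (pvBestA clusters).2.1
  else clusters
termination_by clusters.length
decreasing_by exact h

def cluster_by_concepts_py (analyses : List (List (String × List String))) (n_clusters : Option Int) : List (List (List (String × List String))) :=
  if analyses.isEmpty then []
  else pvLoopA (analyses.map (fun a => [a])) (pvTarget analyses n_clusters)

-- ===== PORT B =====
-- key=lambda p: (-score[p], p) — Python's lexicographic tuple comparison, written out
def pvKeyLt (score : PySem.Dict (Int × Int) Int) (p q : Int × Int) : Bool :=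
  decide (score.getD q 0 < score.getD p 0 ∨
    (score.getD p 0 = score.getD q 0 ∧ (p.1 < q.1 ∨ (p.1 = q.1 ∧ p.2 < q.2))))

-- min(score, key=…): scan the keys keeping the first strict minimum (none = empty dict,
-- where Python raises ValueError — outside Pre_)
def pvMinKey (score : PySem.Dict (Int × Int) Int) : Option (Int × Int) :=
  match score.keys with
  | [] => none
  | p :: rest => some (rest.foldl (fun best q => if pvKeyLt score q best then q else best) p)

-- score = {p: s for p, s in score.items() if i not in p and j not in p};
-- for k in active: if k != i: score[(min(k,i),max(k,i))] = len(csets[i] & csets[k])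
def pvRebuild (active' : List Int) (csets' : PySem.Dict Int (List String))
    (score : PySem.Dict (Int × Int) Int) (i j : Int) : PySem.Dict (Int × Int) Int :=
  active'.foldl (fun d k =>
      if k ≠ i then d.insert (if k < i then (k, i) else (i, k))
                             (pvScore (csets'.getD i []) (csets'.getD k [])) else d)
    (PySem.Dict.ofList (score.items.filter (fun pr =>
      decide (pr.1.1 ≠ i ∧ pr.1.2 ≠ i ∧ pr.1.1 ≠ j ∧ pr.1.2 ≠ j))))

-- while len(active) > target: pick the min-key pair, merge dicts, drop j, rebuild i's row.
-- The dite guard only ensures termination (j ∈ active under the loop invariant).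
def pvLoopB (active : List Int) (members : PySem.Dict Int (List (List (String × List String))))
    (csets : PySem.Dict Int (List String)) (score : PySem.Dict (Int × Int) Int) (target : Int) :
    List (List (List (String × List String))) :=
  if target < (active.length : Int) then
    match pvMinKey score with
    | none => active.map (fun k => members.getD k [])
    | some ij =>
      if h : ((PySem.List.remove? active ij.2).getD active).length < active.length then
        pvLoopB ((PySem.List.remove? active ij.2).getD active)
          ((members.erase ij.2).insert ij.1 (members.getD ij.1 [] ++ members.getD ij.2 []))
          ((csets.erase ij.2).insert ij.1 (PySem.Set.update (csets.getD ij.1 []) (csets.getD ij.2 [])))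
          (pvRebuild ((PySem.List.remove? active ij.2).getD active)
            ((csets.erase ij.2).insert ij.1 (PySem.Set.update (csets.getD ij.1 []) (csets.getD ij.2 [])))
            score ij.1 ij.2)
          target
      else active.map (fun k => members.getD k [])
  else active.map (fun k => members.getD k [])
termination_by active.length
decreasing_by exact h

def cluster_by_concepts_py_alt (analyses : List (List (String × List String))) (n_clusters : Option Int) : List (List (List (String × List String))) :=
  if analyses.isEmpty then []
  else
    let csets0 := (PySem.List.enumerate analyses).foldl
      (fun d ka => d.insert ka.1 (PySem.Set.ofList (pvConcepts ka.2))) PySem.Dict.empty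
    pvLoopB (PySem.List.pyRange 0 (analyses.length : Int))
      ((PySem.List.enumerate analyses).foldl (fun d ka => d.insert ka.1 [ka.2]) PySem.Dict.empty)
      csets0
      ((PySem.List.pyRange 0 (analyses.length : Int)).foldl (fun d x =>
        (PySem.List.pyRange (x+1) (analyses.length : Int)).foldl (fun d y =>
          d.insert (x, y) (pvScore (csets0.getD x []) (csets0.getD y []))) d) PySem.Dict.empty)
      (pvTarget analyses n_clusters)

-- ===== PRECONDITION & SPEC =====
-- Pre_ excludes exactly the inputs where A raises IndexError: a nonempty analyses list together
-- with a negative n_clusters (the merge loop then runs past a single cluster and pops index 1).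
def Pre_cluster_by_concepts_py (analyses : List (List (String × List String))) (n_clusters : Option Int) : Prop :=
  analyses = [] ∨ 0 ≤ n_clusters.getD 0
instance (analyses : List (List (String × List String))) (n_clusters : Option Int) : Decidable (Pre_cluster_by_concepts_py analyses n_clusters) := by unfold Pre_cluster_by_concepts_py; infer_instance
def pvWitness_cluster_by_concepts_py : (List (List (String × List String))) × Option Int :=
  ([[("key_concepts", ["a", "b"])], [("key_concepts", ["b"])], [("key_concepts", ["c"])]], some 1)

def Spec_cluster_by_concepts_py (analyses : List (List (String × List String))) (n_clusters : Option Int) (out : List (List (List (String × List String)))) : Prop := out = cluster_by_concepts_py_alt analyses n_clusters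
instance (analyses : List (List (String × List String))) (n_clusters : Option Int) (out : List (List (List (String × List String)))) : Decidable (Spec_cluster_by_concepts_py analyses n_clusters out) := by unfold Spec_cluster_by_concepts_py; infer_instance

-- ===== CLAIM (what is proved, stated in full; the proofs are below) =====
def Claim_equal_cluster_by_concepts_py : Prop := ∀ (analyses : List (List (String × List String))) (n_clusters : Option Int), Dom_cluster_by_concepts_py analyses n_clusters → Pre_cluster_by_concepts_py analyses n_clusters → Spec_cluster_by_concepts_py analyses n_clusters (cluster_by_concepts_py analyses n_clusters)

-- ===== LEMMAS AND PROOFS =====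

-- A's per-pair value: the concept-overlap score of the clusters at positions p.1 < p.2
def pvSc (clusters : List (List (List (String × List String)))) (p : Nat × Nat) : Int :=
  pvScore (pvClusterConcepts (clusters.getD p.1 [])) (pvClusterConcepts (clusters.getD p.2 []))

-- lexicographic order on position pairs = A's scan order
def pvPlt (p q : Nat × Nat) : Prop := p.1 < q.1 ∨ (p.1 = q.1 ∧ p.2 < q.2)

-- A's "first maximum wins" order: q loses to p if p scores higher, or equal and earlier
def pvAkLt (clusters : List (List (List (String × List String)))) (p q : Nat × Nat) : Prop :=
  pvSc clusters q < pvSc clusters p ∨ (pvSc clusters p = pvSc clusters q ∧ pvPlt p q)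

-- all position pairs p.1 < p.2 < L in scan order
def pvPL (L : Nat) : List (Nat × Nat) :=
  (List.range L).flatMap (fun i => (List.range' (i+1) (L-(i+1))).map (fun j => (i, j)))

-- The loop invariant tying A's positional clusters to B's id-keyed dicts.
def pvInv (clusters : List (List (List (String × List String)))) (ids : List Int)
    (members : PySem.Dict Int (List (List (String × List String))))
    (csets : PySem.Dict Int (List String)) (score : PySem.Dict (Int × Int) Int) : Prop :=
  ids.length = clusters.length ∧
  ids.Pairwise (· < ·) ∧
  (∀ k, k < clusters.length → members.get? (ids.getD k (-1)) = some (clusters.getD k [])) ∧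
  (∀ k, k < clusters.length → (csets.getD (ids.getD k (-1)) []).Nodup ∧
     ∀ x, x ∈ csets.getD (ids.getD k (-1)) [] ↔ x ∈ pvClusterConcepts (clusters.getD k [])) ∧
  score.keys.Nodup ∧
  (∀ a b : Nat, a < b → b < clusters.length →
     score.get? (ids.getD a (-1), ids.getD b (-1)) =
       some (pvScore (csets.getD (ids.getD a (-1)) []) (csets.getD (ids.getD b (-1)) []))) ∧
  (∀ q : Int × Int, (∀ a b : Nat, a < b → b < clusters.length →
     q ≠ (ids.getD a (-1), ids.getD b (-1))) → score.get? q = none)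

theorem pv_mem_cc_from (c : List (List (String × List String))) (s : List String) (x : String) :
    x ∈ c.foldl (fun acc p => PySem.Set.update acc (pvConcepts p)) s ↔
      x ∈ s ∨ ∃ p ∈ c, x ∈ pvConcepts p := by
  induction c generalizing s with
  | nil => simp
  | cons p c ih =>
    simp only [List.foldl_cons, ih, PySem.Set.mem_update, List.mem_cons]
    constructor
    · rintro (⟨h | h⟩ | ⟨q, hq, hx⟩)
      · exact Or.inl h
      · exact Or.inr ⟨p, Or.inl rfl, h⟩
      · exact Or.inr ⟨q, Or.inr hq, hx⟩
    · rintro (h | ⟨q, (rfl | hq), hx⟩)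
      · exact Or.inl (Or.inl h)
      · exact Or.inl (Or.inr hx)
      · exact Or.inr ⟨q, hq, hx⟩

theorem pv_nodup_cc_from (c : List (List (String × List String))) (s : List String)
    (hs : s.Nodup) : (c.foldl (fun acc p => PySem.Set.update acc (pvConcepts p)) s).Nodup := by
  induction c generalizing s with
  | nil => exact hs
  | cons p c ih => exact ih _ (PySem.Set.nodup_update _ _ hs)

theorem pv_mem_cc (c : List (List (String × List String))) (x : String) :
    x ∈ pvClusterConcepts c ↔ ∃ p ∈ c, x ∈ pvConcepts p := by
  simpa using pv_mem_cc_from c [] x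

theorem pv_nodup_cc (c : List (List (String × List String))) : (pvClusterConcepts c).Nodup :=
  pv_nodup_cc_from c [] List.nodup_nil

theorem pv_score_congr (ci ci' cj cj' : List String) (h1 : ci.Nodup) (h2 : ci'.Nodup)
    (hi : ∀ x, x ∈ ci ↔ x ∈ ci') (hj : ∀ x, x ∈ cj ↔ x ∈ cj') :
    pvScore ci cj = pvScore ci' cj' := by
  unfold pvScore
  have hperm : (PySem.Set.inter ci cj).Perm (PySem.Set.inter ci' cj') := by
    rw [List.perm_ext_iff_of_nodup (PySem.Set.nodup_inter _ _ h1) (PySem.Set.nodup_inter _ _ h2)]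
    intro x
    simp only [PySem.Set.mem_inter, hi x, hj x]
  exact_mod_cast hperm.length_eq

theorem pv_score_comm (ci cj : List String) (h1 : ci.Nodup) (h2 : cj.Nodup) :
    pvScore ci cj = pvScore cj ci := by
  unfold pvScore
  have hperm : (PySem.Set.inter ci cj).Perm (PySem.Set.inter cj ci) := by
    rw [List.perm_ext_iff_of_nodup (PySem.Set.nodup_inter _ _ h1) (PySem.Set.nodup_inter _ _ h2)]
    intro x
    simp only [PySem.Set.mem_inter]
    tauto
  exact_mod_cast hperm.length_eq

theorem pv_score_nonneg (ci cj : List String) : 0 ≤ pvScore ci cj := by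
  unfold pvScore; positivity

-- getD through eraseIdx below the erased index, and through set
theorem pv_getD_eraseIdx_lt {α : Type} (l : List α) (i j : Nat) (d : α) (hij : i < j)
    (hj : j < l.length) : (l.eraseIdx j).getD i d = l.getD i d := by
  rw [List.getD_eq_getElem?_getD, List.getD_eq_getElem?_getD, List.getElem?_eraseIdx]
  simp [hij]

theorem pv_getD_eraseIdx_ge {α : Type} (l : List α) (j k : Nat) (d : α) (hjk : j ≤ k)
    (hk : k + 1 < l.length) : (l.eraseIdx j).getD k d = l.getD (k+1) d := by
  rw [List.getD_eq_getElem?_getD, List.getD_eq_getElem?_getD, List.getElem?_eraseIdx]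
  simp [Nat.not_lt.mpr hjk]

theorem pv_getD_set {α : Type} (l : List α) (i k : Nat) (v d : α) (hi : i < l.length) :
    (l.set i v).getD k d = if k = i then v else l.getD k d := by
  rw [List.getD_eq_getElem?_getD, List.getD_eq_getElem?_getD, List.getElem?_set]
  split_ifs with h1 h2 h3
  · simp
  · omega
  · omega
  · rfl

-- ---- Dict helper lemmas (erase / fold-of-inserts as a function) ----
theorem pv_get?_erase {κ ν : Type} [BEq κ] [LawfulBEq κ] [DecidableEq κ] (d : PySem.Dict κ ν) (j q : κ) :
    (d.erase j).get? q = if q = j then none else d.get? q := by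
  obtain ⟨items⟩ := d
  simp only [PySem.Dict.erase, PySem.Dict.get?]
  induction items with
  | nil => cases h : decide (q = j) <;> simp_all
  | cons p t ih =>
    by_cases hpj : p.1 = j
    · rw [List.filter_cons_of_neg (by simp [hpj])]
      by_cases hqj : q = j
      · rw [if_pos hqj] at ih ⊢
        exact ih
      · rw [if_neg hqj] at ih ⊢
        rw [ih, List.find?_cons_of_neg ?_]
        show ¬ (p.1 == q) = true
        rw [beq_iff_eq, hpj]
        exact fun h => hqj h.symm
    · rw [List.filter_cons_of_pos (by simp [hpj])]
      by_cases hpq : p.1 = q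
      · have hqj : ¬ q = j := fun h => hpj (hpq.trans h)
        rw [if_neg hqj, List.find?_cons_of_pos (by simp [hpq]), List.find?_cons_of_pos (by simp [hpq])]
      · rw [List.find?_cons_of_neg (by simp [hpq])]
        rw [ih]
        by_cases hqj : q = j
        · rw [if_pos hqj, if_pos hqj]
        · rw [if_neg hqj, if_neg hqj, List.find?_cons_of_neg (by simp [hpq])]

theorem pv_foldins_get?_miss {α κ ν : Type} [BEq κ] [LawfulBEq κ] (l : List α) (key : α → κ)
    (val : α → ν) (d : PySem.Dict κ ν) (q : κ) (h : ∀ x ∈ l, key x ≠ q) :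
    (l.foldl (fun d x => d.insert (key x) (val x)) d).get? q = d.get? q := by
  induction l generalizing d with
  | nil => rfl
  | cons x t ih =>
    rw [List.foldl_cons, ih _ (fun y hy => h y (List.mem_cons_of_mem _ hy)),
      PySem.Dict.get?_insert_of_ne _ _ (fun he => h x List.mem_cons_self he.symm)]

theorem pv_foldins_get?_hit {α κ ν : Type} [BEq κ] [LawfulBEq κ] (l : List α) (key : α → κ)
    (val : α → ν) (d : PySem.Dict κ ν) (q : κ) (v : ν)
    (hex : ∃ x ∈ l, key x = q) (hagree : ∀ x ∈ l, key x = q → val x = v) :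
    (l.foldl (fun d x => d.insert (key x) (val x)) d).get? q = some v := by
  induction l generalizing d with
  | nil => obtain ⟨x, hx, _⟩ := hex; exact absurd hx List.not_mem_nil
  | cons x t ih =>
    rw [List.foldl_cons]
    by_cases hex' : ∃ y ∈ t, key y = q
    · exact ih _ hex' (fun y hy => hagree y (List.mem_cons_of_mem _ hy))
    · push_neg at hex'
      have hxq : key x = q := by
        obtain ⟨y, hy, hk⟩ := hex
        rcases List.mem_cons.mp hy with rfl | hyt
        · exact hk
        · exact absurd hk (hex' y hyt)
      rw [pv_foldins_get?_miss _ _ _ _ _ hex', hxq, PySem.Dict.get?_insert_self,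
        hagree x List.mem_cons_self hxq]

-- ---- enumerate ----
theorem pv_enumerate_mem {α : Type} (l : List α) (s : Int) (p : Int × α) :
    p ∈ PySem.List.enumerate l s ↔ ∃ t : Nat, ∃ h : t < l.length, p = (s + t, l[t]) := by
  induction l generalizing s with
  | nil => simp [PySem.List.enumerate]
  | cons x xs ih =>
    show p ∈ (s, x) :: PySem.List.enumerate xs (s + 1) ↔ _
    rw [List.mem_cons, ih]
    constructor
    · rintro (rfl | ⟨t, h, rfl⟩)
      · exact ⟨0, by simp⟩
      · refine ⟨t + 1, by simpa using h, ?_⟩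
        rw [Prod.ext_iff]
        refine ⟨by push_cast; ring, by simp⟩
    · rintro ⟨t, h, rfl⟩
      cases t with
      | zero => left; simp
      | succ t =>
        right
        refine ⟨t, by simpa using h, ?_⟩
        rw [Prod.ext_iff]
        refine ⟨by push_cast; ring, by simp⟩

-- ---- min-fold and first-max-fold characterizations ----
theorem pv_fold_keep (l : List (Nat × Nat)) (v : Nat × Nat → Int) (acc : Nat × Nat × Int)
    (h : ∀ q ∈ l, v q ≤ acc.2.2) :
    l.foldl (fun b p => if b.2.2 < v p then (p.1, p.2, v p) else b) acc = acc := by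
  induction l with
  | nil => rfl
  | cons q t ih =>
    rw [List.foldl_cons, if_neg (not_lt.mpr (h q List.mem_cons_self))]
    exact ih (fun q' hq' => h q' (List.mem_cons_of_mem _ hq'))

theorem pv_plt_asym (p q : Nat × Nat) (h : pvPlt p q) : ¬ pvPlt q p := by
  unfold pvPlt at *; omega

theorem pv_fold_improve (v : Nat × Nat → Int) (m : Nat × Nat) :
    ∀ l : List (Nat × Nat), m ∈ l → (∀ q ∈ l, v q ≤ v m) →
      (∀ q ∈ l, q ≠ m → v q < v m ∨ pvPlt m q) → l.Pairwise pvPlt →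
      ∀ acc : Nat × Nat × Int, acc.2.2 < v m →
      l.foldl (fun b p => if b.2.2 < v p then (p.1, p.2, v p) else b) acc = (m.1, m.2, v m) := by
  intro l
  induction l with
  | nil => intro hm; exact absurd hm List.not_mem_nil
  | cons p t ih =>
    intro hm hmax hfirst hsort acc hacc
    rw [List.foldl_cons]
    by_cases hpm : p = m
    · subst hpm
      rw [if_pos hacc]
      exact pv_fold_keep t v _ (fun q hq => hmax q (List.mem_cons_of_mem _ hq))
    · have hmt : m ∈ t := (List.mem_cons.mp hm).resolve_left (fun h => hpm h.symm)
      have hplt : pvPlt p m := (List.pairwise_cons.mp hsort).1 m hmt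
      have hvpm : v p < v m := by
        rcases hfirst p List.mem_cons_self hpm with h | h
        · exact h
        · exact absurd h (pv_plt_asym _ _ hplt)
      refine ih hmt (fun q hq => hmax q (List.mem_cons_of_mem _ hq))
        (fun q hq h => hfirst q (List.mem_cons_of_mem _ hq) h)
        (List.pairwise_cons.mp hsort).2 _ ?_
      split
      · exact hvpm
      · exact hacc

theorem pv_fold_min {α : Type} (K : α → α → Bool)
    (hasym : ∀ a b, K a b = true → ¬ K b a = true) :
    ∀ (l : List α) (acc m : α), (m = acc ∨ m ∈ l) → (∀ q ∈ l, q ≠ m → K m q = true) →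
      (acc ≠ m → K m acc = true) →
      l.foldl (fun best q => if K q best then q else best) acc = m := by
  intro l
  induction l with
  | nil =>
    intro acc m hmem _ _
    rcases hmem with rfl | h
    · rfl
    · exact absurd h List.not_mem_nil
  | cons q t ih =>
    intro acc m hmem hall hK
    rw [List.foldl_cons]
    have hmem' : m = (if K q acc then q else acc) ∨ m ∈ t := by
      rcases hmem with rfl | hm
      · rcases eq_or_ne q m with rfl | hqm
        · left; split <;> rfl
        · left
          rw [if_neg (fun h => hasym _ _ (hall q List.mem_cons_self hqm) h)]
      · rcases List.mem_cons.mp hm with rfl | hmt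
        · by_cases hacc : acc = m
          · left; rw [hacc]; split <;> rfl
          · left; rw [if_pos (hK hacc)]
        · exact Or.inr hmt
    refine ih _ _ hmem' (fun r hr h => hall r (List.mem_cons_of_mem _ hr) h) ?_
    by_cases hKq : K q acc = true
    · rw [if_pos hKq]
      intro hne
      exact hall q List.mem_cons_self hne
    · rw [if_neg hKq]
      exact hK

theorem pv_exists_min {α : Type} (R : α → α → Prop)
    (htot : ∀ a b : α, a ≠ b → R a b ∨ R b a)
    (htrans : ∀ a b c : α, R a b → R b c → R a c) :
    ∀ l : List α, l ≠ [] → ∃ m ∈ l, ∀ q ∈ l, q ≠ m → R m q := by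
  intro l
  induction l with
  | nil => intro h; exact absurd rfl h
  | cons x t ih =>
    intro _
    rcases eq_or_ne t [] with rfl | hne
    · refine ⟨x, List.mem_cons_self, ?_⟩
      rintro q hq hqx
      rcases List.mem_cons.mp hq with rfl | hq'
      · exact absurd rfl hqx
      · exact absurd hq' List.not_mem_nil
    · obtain ⟨m', hm', hmin'⟩ := ih hne
      by_cases hxm : x = m'
      · refine ⟨m', List.mem_cons_of_mem _ hm', ?_⟩
        rintro q hq hqm
        rcases List.mem_cons.mp hq with rfl | hqt
        · exact absurd hxm hqm
        · exact hmin' q hqt hqm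
      · by_cases hR : R m' x
        · refine ⟨m', List.mem_cons_of_mem _ hm', ?_⟩
          rintro q hq hqm
          rcases List.mem_cons.mp hq with rfl | hqt
          · exact hR
          · exact hmin' q hqt hqm
        · have hRx : R x m' := (htot x m' hxm).resolve_right hR
          refine ⟨x, List.mem_cons_self, ?_⟩
          rintro q hq hqx
          rcases List.mem_cons.mp hq with rfl | hqt
          · exact absurd rfl hqx
          · by_cases hqm : q = m'
            · exact hqm ▸ hRx
            · exact htrans _ _ _ hRx (hmin' q hqt hqm)

-- ---- pvPL ----
theorem pv_PL_mem (L : Nat) (p : Nat × Nat) : p ∈ pvPL L ↔ p.1 < p.2 ∧ p.2 < L := by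
  unfold pvPL
  rw [List.mem_flatMap]
  constructor
  · rintro ⟨i, hi, hp⟩
    rw [List.mem_map] at hp
    obtain ⟨j, hj, rfl⟩ := hp
    rw [List.mem_range] at hi
    rw [List.mem_range'_1] at hj
    constructor
    · exact by omega
    · exact by omega
  · rintro ⟨h1, h2⟩
    refine ⟨p.1, List.mem_range.mpr (by omega), List.mem_map.mpr ⟨p.2, ?_, rfl⟩⟩
    rw [List.mem_range'_1]
    omega

theorem pv_PL_pairwise (L : Nat) : (pvPL L).Pairwise pvPlt := by
  unfold pvPL
  rw [List.pairwise_flatMap]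
  constructor
  · intro i _
    rw [List.pairwise_map]
    exact (List.pairwise_lt_range' 1).imp (fun h => Or.inr ⟨rfl, h⟩)
  · apply List.Pairwise.imp ?_ List.pairwise_lt_range
    rintro a b hab x hx y hy
    rw [List.mem_map] at hx hy
    obtain ⟨jx, _, rfl⟩ := hx
    obtain ⟨jy, _, rfl⟩ := hy
    exact Or.inl hab

theorem pv_bestA_eq_foldPL (clusters : List (List (List (String × List String)))) :
    pvBestA clusters = (pvPL clusters.length).foldl
      (fun b p => if b.2.2 < pvSc clusters p then (p.1, p.2, pvSc clusters p) else b) (0, 1, -1) := by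
  unfold pvBestA pvPL
  rw [List.foldl_flatMap]
  apply PySem.List.foldl_congr_mem
  intro acc i _
  rw [List.foldl_map]
  rfl

-- A's merge of the best pair (set then pop), as one function of the pair of positions
def pvMergeA (clusters : List (List (List (String × List String)))) (m1 m2 : Nat) :
    List (List (List (String × List String))) :=
  (clusters.set m1 (clusters.getD m1 [] ++ clusters.getD m2 [])).eraseIdx m2

theorem pv_mergeA_length (clusters : List (List (List (String × List String)))) (m1 m2 : Nat)
    (h2 : m2 < clusters.length) : (pvMergeA clusters m1 m2).length = clusters.length - 1 := by
  unfold pvMergeA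
  rw [List.length_eraseIdx_of_lt (by simpa using h2), List.length_set]

theorem pv_mergeA_getD (clusters : List (List (List (String × List String)))) (m1 m2 : Nat)
    (h1 : m1 < m2) (h2 : m2 < clusters.length) (k : Nat) :
    (pvMergeA clusters m1 m2).getD k [] =
      if k = m1 then clusters.getD m1 [] ++ clusters.getD m2 []
      else (clusters.eraseIdx m2).getD k [] := by
  unfold pvMergeA
  rw [List.eraseIdx_set_gt h1,
    pv_getD_set _ _ _ _ _ (by rw [List.length_eraseIdx_of_lt h2]; omega)]

theorem pv_keyLt_asym (s : PySem.Dict (Int × Int) Int) (p q : Int × Int)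
    (h : pvKeyLt s p q = true) : ¬ pvKeyLt s q p = true := by
  simp only [pvKeyLt, decide_eq_true_eq] at *
  omega

theorem pv_assemble (clusters : List (List (List (String × List String)))) (ids : List Int)
    (members : PySem.Dict Int (List (List (String × List String))))
    (hlen : ids.length = clusters.length)
    (hmem : ∀ k, k < clusters.length → members.get? (ids.getD k (-1)) = some (clusters.getD k [])) :
    ids.map (fun k => members.getD k []) = clusters := by
  apply List.ext_getElem (by simpa using hlen)
  intro k h1 h2
  rw [List.getElem_map]
  have h3 := hmem k h2
  rw [List.getD_eq_getElem _ _ (by simpa using h1)] at h3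
  rw [PySem.Dict.getD_of_get?_eq_some _ _ h3, List.getD_eq_getElem _ _ h2]

theorem pv_get?_filtered (score : PySem.Dict (Int × Int) Int) (cond : Int × Int → Prop)
    [DecidablePred cond] (hn : score.keys.Nodup) (q : Int × Int) :
    (PySem.Dict.ofList (score.items.filter (fun pr => decide (cond pr.1)))).get? q
      = if cond q then score.get? q else none := by
  show ((score.items.filter (fun pr => decide (cond pr.1))).foldl
      (fun acc p => acc.insert p.1 p.2) PySem.Dict.empty).get? q = _
  by_cases hc : cond q
  · rw [if_pos hc]
    cases hg : score.get? q with
    | none =>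
      have hq : q ∉ score.keys := (PySem.Dict.get?_eq_none_iff_not_mem_keys _ _).mp hg
      rw [pv_foldins_get?_miss _ Prod.fst Prod.snd _ _ ?_]
      · rfl
      · intro x hx he
        apply hq
        rw [← he]
        show x.1 ∈ score.items.map (fun y => y.1)
        exact List.mem_map_of_mem (List.mem_of_mem_filter hx)
    | some v =>
      apply pv_foldins_get?_hit
      · exact ⟨(q, v), List.mem_filter.mpr
          ⟨(PySem.Dict.get?_eq_some_iff_mem_items _ _ _ hn).mp hg, by simpa using hc⟩, rfl⟩
      · intro x hx he
        have hg2 := PySem.Dict.get?_of_mem_items _ (List.mem_of_mem_filter hx) hn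
        rw [he, hg] at hg2
        exact (Option.some_inj.mp hg2).symm
  · rw [if_neg hc, pv_foldins_get?_miss _ Prod.fst Prod.snd _ _ ?_]
    · rfl
    · intro x hx he
      have h2 := (List.mem_filter.mp hx).2
      rw [he] at h2
      simp only [decide_eq_true_eq] at h2
      exact hc h2

theorem pv_fold_cond_eq {D : Type} (l : List Int) (i : Int) (f : D → Int → D) (init : D) :
    l.foldl (fun d k => if k ≠ i then f d k else d) init
      = (l.filter (fun k => decide (k ≠ i))).foldl f init := by
  rw [List.foldl_filter]
  apply PySem.List.foldl_congr_mem
  intro acc x _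
  by_cases h : x = i <;> simp [h]

theorem pv_best_link (clusters : List (List (List (String × List String)))) (ids : List Int)
    (members : PySem.Dict Int (List (List (String × List String))))
    (csets : PySem.Dict Int (List String)) (score : PySem.Dict (Int × Int) Int)
    (hinv : pvInv clusters ids members csets score) (h2 : 2 ≤ clusters.length) :
    ∃ m : Nat × Nat, m.1 < m.2 ∧ m.2 < clusters.length ∧
      pvBestA clusters = (m.1, m.2, pvSc clusters m) ∧
      pvMinKey score = some (ids.getD m.1 (-1), ids.getD m.2 (-1)) := by
  obtain ⟨hlen, hsorted, hmem, hcset, hnodupk, hspos, hsneg⟩ := hinv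
  have hmono : ∀ a b : Nat, a < b → b < clusters.length →
      ids.getD a (-1) < ids.getD b (-1) := by
    intro a b hab hb
    have ha' : a < ids.length := by omega
    have hb' : b < ids.length := by omega
    rw [List.getD_eq_getElem _ _ ha', List.getD_eq_getElem _ _ hb']
    exact List.pairwise_iff_getElem.mp hsorted a b ha' hb' hab
  have hval : ∀ a b : Nat, a < b → b < clusters.length →
      score.getD (ids.getD a (-1), ids.getD b (-1)) 0 = pvSc clusters (a, b) := by
    intro a b hab hb
    rw [PySem.Dict.getD_of_get?_eq_some _ _ (hspos a b hab hb)]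
    exact pv_score_congr _ _ _ _ (hcset a (by omega)).1 (pv_nodup_cc _)
      (hcset a (by omega)).2 (hcset b hb).2
  -- the first maximum of A's scan, as the minimum of the "higher score, else earlier" order
  obtain ⟨m, hmPL, hmin⟩ := pv_exists_min (pvAkLt clusters)
    (by
      intro a b hne
      unfold pvAkLt pvPlt
      simp only [Ne, Prod.ext_iff] at hne
      omega)
    (by intro a b c hab hbc; unfold pvAkLt pvPlt at *; omega)
    (pvPL clusters.length)
    (by
      intro hnil
      have : (0, 1) ∈ pvPL clusters.length := (pv_PL_mem _ _).mpr (by constructor <;> omega)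
      rw [hnil] at this
      exact absurd this List.not_mem_nil)
  obtain ⟨m1, m2⟩ := m
  obtain ⟨hm12, hm2⟩ := (pv_PL_mem _ _).mp hmPL
  refine ⟨(m1, m2), hm12, hm2, ?_, ?_⟩
  · rw [pv_bestA_eq_foldPL]
    apply pv_fold_improve
    · exact hmPL
    · intro q hq
      rcases eq_or_ne q (m1, m2) with rfl | hne
      · exact le_refl _
      · have := hmin q hq hne
        unfold pvAkLt at this
        omega
    · intro q hq hne
      have := hmin q hq hne
      unfold pvAkLt at this
      tauto
    · exact pv_PL_pairwise _
    · have h0 := pv_score_nonneg (pvClusterConcepts (clusters.getD m1 []))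
        (pvClusterConcepts (clusters.getD m2 []))
      show (-1 : Int) < pvSc clusters (m1, m2)
      have h1 : (0 : Int) ≤ pvSc clusters (m1, m2) := by simpa [pvSc] using h0
      omega
  · -- B's keyed min picks the id pair of the same m
    have hgen : ∀ q ∈ score.keys, q ≠ (ids.getD m1 (-1), ids.getD m2 (-1)) →
        pvKeyLt score (ids.getD m1 (-1), ids.getD m2 (-1)) q = true := by
      intro q hq hne
      have hgq : score.get? q ≠ none :=
        fun h => ((PySem.Dict.get?_eq_none_iff_not_mem_keys _ _).mp h) hq
      have hex : ∃ a b : Nat, a < b ∧ b < clusters.length ∧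
          q = (ids.getD a (-1), ids.getD b (-1)) := by
        by_contra hno
        push_neg at hno
        exact hgq (hsneg q (fun a b hab hb => hno a b hab hb))
      obtain ⟨a, b, hab, hb, rfl⟩ := hex
      have habm : (a, b) ≠ (m1, m2) := by
        intro h
        rw [Prod.mk.injEq] at h
        exact hne (by rw [h.1, h.2])
      have hR := hmin (a, b) ((pv_PL_mem _ _).mpr ⟨hab, hb⟩) habm
      unfold pvAkLt at hR
      simp only [pvKeyLt, decide_eq_true_eq]
      rw [hval a b hab hb, hval m1 m2 hm12 hm2]
      rcases hR with h | ⟨heq, hplt⟩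
      · left; exact h
      · right
        refine ⟨heq, ?_⟩
        unfold pvPlt at hplt
        simp only at hplt
        rcases hplt with h | ⟨he, h⟩
        · left; exact hmono m1 a h (by omega)
        · right
          exact ⟨by rw [he], hmono m2 b h hb⟩
    have hqmem : (ids.getD m1 (-1), ids.getD m2 (-1)) ∈ score.keys := by
      by_contra h
      have := (PySem.Dict.get?_eq_none_iff_not_mem_keys score _).mpr h
      rw [hspos m1 m2 hm12 hm2] at this
      exact Option.some_ne_none _ this
    obtain ⟨p, rest, hK⟩ : ∃ p rest, score.keys = p :: rest := by
      cases hK2 : score.keys with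
      | nil => rw [hK2] at hqmem; exact absurd hqmem List.not_mem_nil
      | cons p rest => exact ⟨p, rest, rfl⟩
    have hMK : pvMinKey score = some (rest.foldl
        (fun best q => if pvKeyLt score q best then q else best) p) := by
      unfold pvMinKey
      rw [hK]
    rw [hMK]
    congr 1
    apply pv_fold_min (pvKeyLt score) (pv_keyLt_asym score) rest p
    · rw [hK] at hqmem
      rcases List.mem_cons.mp hqmem with h | h
      · exact Or.inl h
      · exact Or.inr h
    · intro q hq hne
      exact hgen q (by rw [hK]; exact List.mem_cons_of_mem _ hq) hne
    · intro hne
      exact hgen p (by rw [hK]; exact List.mem_cons_self) hne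

theorem pv_step_inv (clusters : List (List (List (String × List String)))) (ids : List Int)
    (members : PySem.Dict Int (List (List (String × List String))))
    (csets : PySem.Dict Int (List String)) (score : PySem.Dict (Int × Int) Int)
    (m1 m2 : Nat) (hinv : pvInv clusters ids members csets score)
    (h12 : m1 < m2) (h2 : m2 < clusters.length) :
    pvInv (pvMergeA clusters m1 m2) (ids.eraseIdx m2)
      ((members.erase (ids.getD m2 (-1))).insert (ids.getD m1 (-1))
        (members.getD (ids.getD m1 (-1)) [] ++ members.getD (ids.getD m2 (-1)) []))
      ((csets.erase (ids.getD m2 (-1))).insert (ids.getD m1 (-1))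
        (PySem.Set.update (csets.getD (ids.getD m1 (-1)) []) (csets.getD (ids.getD m2 (-1)) [])))
      (pvRebuild (ids.eraseIdx m2)
        ((csets.erase (ids.getD m2 (-1))).insert (ids.getD m1 (-1))
          (PySem.Set.update (csets.getD (ids.getD m1 (-1)) []) (csets.getD (ids.getD m2 (-1)) [])))
        score (ids.getD m1 (-1)) (ids.getD m2 (-1))) := by
  obtain ⟨hlen, hsorted, hmem, hcset, hnodupk, hspos, hsneg⟩ := hinv
  set L := clusters.length with hL
  set i := ids.getD m1 (-1) with hi
  set j := ids.getD m2 (-1) with hj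
  set ids' := ids.eraseIdx m2 with hids'def
  set csets' := (csets.erase j).insert i
    (PySem.Set.update (csets.getD i []) (csets.getD j [])) with hcsets'def
  set members' := (members.erase j).insert i
    (members.getD i [] ++ members.getD j []) with hmembers'def
  set C' := pvMergeA clusters m1 m2 with hC'def
  -- basic position arithmetic
  have hm2ids : m2 < ids.length := by omega
  have hlen' : ids'.length = L - 1 := by
    rw [hids'def, List.length_eraseIdx_of_lt hm2ids, hlen]
  have hCl : C'.length = L - 1 := pv_mergeA_length _ _ _ h2
  have hnodup_ids : ids.Nodup := hsorted.imp (fun h => ne_of_lt h)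
  have hposinj : ∀ a b : Nat, a < L → b < L → ids.getD a (-1) = ids.getD b (-1) → a = b := by
    intro a b ha hb he
    rw [List.getD_eq_getElem _ _ (by omega), List.getD_eq_getElem _ _ (by omega)] at he
    exact (List.Nodup.getElem_inj_iff hnodup_ids).mp he
  have hmono : ∀ a b : Nat, a < b → b < L → ids.getD a (-1) < ids.getD b (-1) := by
    intro a b hab hb
    rw [List.getD_eq_getElem _ _ (by omega), List.getD_eq_getElem _ _ (by omega)]
    exact List.pairwise_iff_getElem.mp hsorted a b (by omega) (by omega) hab
  have hij : i < j := hmono m1 m2 h12 h2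
  have hids' : ∀ k : Nat, k < L - 1 →
      ids'.getD k (-1) = ids.getD (if k < m2 then k else k + 1) (-1) := by
    intro k hk
    rw [hids'def]
    by_cases h : k < m2
    · rw [if_pos h]
      exact pv_getD_eraseIdx_lt _ _ _ _ h hm2ids
    · rw [if_neg h]
      exact pv_getD_eraseIdx_ge _ _ _ _ (by omega) (by omega)
  have hidm1' : ids'.getD m1 (-1) = i := by
    rw [hids' m1 (by omega), if_pos h12]
  have hsorted' : ids'.Pairwise (· < ·) := List.Pairwise.sublist (List.eraseIdx_sublist ids m2) hsorted
  have hmono' : ∀ a b : Nat, a < b → b < L - 1 → ids'.getD a (-1) < ids'.getD b (-1) := by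
    intro a b hab hb
    rw [List.getD_eq_getElem _ _ (by omega), List.getD_eq_getElem _ _ (by omega)]
    exact List.pairwise_iff_getElem.mp hsorted' a b (by omega) (by omega) hab
  have hposinj' : ∀ a b : Nat, a < L - 1 → b < L - 1 →
      ids'.getD a (-1) = ids'.getD b (-1) → a = b := by
    intro a b ha hb he
    rcases Nat.lt_trichotomy a b with h | h | h
    · exact absurd he (ne_of_lt (hmono' a b h hb))
    · exact h
    · exact absurd he.symm (ne_of_lt (hmono' b a h ha))
  have hjnot : j ∉ ids' := by
    intro hmem'
    rw [List.mem_iff_getElem] at hmem'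
    obtain ⟨k, hk, he⟩ := hmem'
    rw [hlen'] at hk
    have he' : ids'.getD k (-1) = j := by
      rw [List.getD_eq_getElem _ _ (by omega)]
      exact he
    rw [hids' k hk] at he'
    have := hposinj _ m2 (by split_ifs <;> omega) (by omega) he'
    split_ifs at this <;> omega
  have hC' : ∀ k : Nat, k < L - 1 → C'.getD k [] =
      if k = m1 then clusters.getD m1 [] ++ clusters.getD m2 []
      else clusters.getD (if k < m2 then k else k + 1) [] := by
    intro k hk
    rw [hC'def, pv_mergeA_getD _ _ _ h12 h2]
    split_ifs with hkm hlt
    · rfl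
    · exact pv_getD_eraseIdx_lt _ _ _ _ hlt h2
    · exact pv_getD_eraseIdx_ge _ _ _ _ (by omega) (by omega)
  have hmi : members.getD i [] = clusters.getD m1 [] :=
    PySem.Dict.getD_of_get?_eq_some _ _ (hmem m1 (by omega))
  have hmj : members.getD j [] = clusters.getD m2 [] :=
    PySem.Dict.getD_of_get?_eq_some _ _ (hmem m2 h2)
  -- the id at a surviving position, its old position, and its relation to i and j
  have hold : ∀ k : Nat, k < L - 1 → k ≠ m1 →
      ids'.getD k (-1) ≠ i ∧ ids'.getD k (-1) ≠ j := by
    intro k hk hkm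
    rw [hids' k hk]
    constructor
    · intro he
      have := hposinj _ m1 (by split_ifs <;> omega) (by omega) he
      split_ifs at this <;> omega
    · intro he
      have := hposinj _ m2 (by split_ifs <;> omega) (by omega) he
      split_ifs at this <;> omega
  -- untouched ids keep their concept sets
  have hcun : ∀ x : Int, x ≠ i → x ≠ j → csets'.getD x [] = csets.getD x [] := by
    intro x hxi hxj
    rw [hcsets'def, PySem.Dict.getD_insert_of_ne _ _ _ hxi, PySem.Dict.getD_eq_get?_getD,
      pv_get?_erase, if_neg hxj, ← PySem.Dict.getD_eq_get?_getD]
  -- component 3: members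
  have hc3 : ∀ k, k < C'.length → members'.get? (ids'.getD k (-1)) = some (C'.getD k []) := by
    intro k hk
    rw [hCl] at hk
    rw [hC' k hk]
    by_cases hkm : k = m1
    · subst hkm
      rw [hidm1', if_pos rfl, hmembers'def, PySem.Dict.get?_insert_self, hmi, hmj]
    · obtain ⟨hni, hnj⟩ := hold k hk hkm
      rw [if_neg hkm, hmembers'def, PySem.Dict.get?_insert_of_ne _ _ hni, pv_get?_erase,
        if_neg hnj, hids' k hk]
      exact hmem _ (by split_ifs <;> omega)
  -- component 4: concept sets
  have hc4 : ∀ k, k < C'.length → (csets'.getD (ids'.getD k (-1)) []).Nodup ∧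
      ∀ x, x ∈ csets'.getD (ids'.getD k (-1)) [] ↔ x ∈ pvClusterConcepts (C'.getD k []) := by
    intro k hk
    rw [hCl] at hk
    rw [hC' k hk]
    by_cases hkm : k = m1
    · subst hkm
      rw [hidm1', if_pos rfl, hcsets'def, PySem.Dict.getD_insert_self]
      constructor
      · exact PySem.Set.nodup_update _ _ (hcset k (by omega)).1
      · intro x
        rw [PySem.Set.mem_update]
        unfold pvClusterConcepts
        rw [List.foldl_append]
        rw [show (clusters.getD k []).foldl (fun acc p => PySem.Set.update acc (pvConcepts p)) []
            = pvClusterConcepts (clusters.getD k []) from rfl]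
        rw [pv_mem_cc_from, ← pv_mem_cc]
        rw [(hcset k (by omega)).2 x, (hcset m2 h2).2 x]
    · obtain ⟨hni, hnj⟩ := hold k hk hkm
      rw [if_neg hkm, hcun _ hni hnj, hids' k hk]
      exact hcset _ (by split_ifs <;> omega)
  -- components 5-7: the rebuilt score table
  have hfilt : ∀ q : Int × Int, (PySem.Dict.ofList (score.items.filter (fun pr =>
      decide (pr.1.1 ≠ i ∧ pr.1.2 ≠ i ∧ pr.1.1 ≠ j ∧ pr.1.2 ≠ j)))).get? q
      = if q.1 ≠ i ∧ q.2 ≠ i ∧ q.1 ≠ j ∧ q.2 ≠ j then score.get? q else none :=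
    fun q => pv_get?_filtered score (fun p => p.1 ≠ i ∧ p.2 ≠ i ∧ p.1 ≠ j ∧ p.2 ≠ j) hnodupk q
  have hreb : pvRebuild ids' csets' score i j =
      (ids'.filter (fun k => decide (k ≠ i))).foldl
        (fun d x => d.insert (if x < i then (x, i) else (i, x))
          (pvScore (csets'.getD i []) (csets'.getD x [])))
        (PySem.Dict.ofList (score.items.filter (fun pr =>
          decide (pr.1.1 ≠ i ∧ pr.1.2 ≠ i ∧ pr.1.1 ≠ j ∧ pr.1.2 ≠ j)))) := by
    unfold pvRebuild
    rw [pv_fold_cond_eq]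
  have hkeyinj : ∀ x y : Int, x ≠ i → y ≠ i →
      (if x < i then (x, i) else (i, x)) = (if y < i then (y, i) else (i, y)) → x = y := by
    intro x y hx hy he
    split_ifs at he <;> rw [Prod.mk.injEq] at he <;> omega
  have hmemF : ∀ x : Int, x ∈ ids'.filter (fun k => decide (k ≠ i)) ↔ x ∈ ids' ∧ x ≠ i := by
    intro x
    rw [List.mem_filter]
    simp
  have hmem_of_pos : ∀ k : Nat, k < L - 1 → ids'.getD k (-1) ∈ ids' := by
    intro k hk
    rw [List.getD_eq_getElem _ _ (by omega)]
    exact List.getElem_mem _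
  have hpos_of_mem : ∀ x ∈ ids', ∃ k : Nat, k < L - 1 ∧ ids'.getD k (-1) = x := by
    intro x hx
    rw [List.mem_iff_getElem] at hx
    obtain ⟨k, hk, he⟩ := hx
    exact ⟨k, by omega, by rw [List.getD_eq_getElem _ _ hk]; exact he⟩
  have hc5 : (pvRebuild ids' csets' score i j).keys.Nodup := by
    rw [hreb, PySem.Dict.keys_foldl_insert_key]
    apply PySem.Set.nodup_update
    show (PySem.Dict.ofList _).keys.Nodup
    rw [show ∀ ps : List ((Int × Int) × Int), PySem.Dict.ofList ps
        = ps.foldl (fun acc p => acc.insert p.1 p.2) PySem.Dict.empty from fun _ => rfl,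
      PySem.Dict.keys_foldl_insert_key]
    show (PySem.Set.update ([] : List (Int × Int)) _).Nodup
    rw [PySem.Set.update_nil_left]
    exact PySem.Set.nodup_ofList _
  have hc6 : ∀ a b : Nat, a < b → b < C'.length →
      (pvRebuild ids' csets' score i j).get? (ids'.getD a (-1), ids'.getD b (-1)) =
        some (pvScore (csets'.getD (ids'.getD a (-1)) []) (csets'.getD (ids'.getD b (-1)) [])) := by
    intro a b hab hb
    rw [hCl] at hb
    rw [hreb]
    by_cases hbm : b = m1
    · -- the second component is the merged cluster's id i
      have hq2 : ids'.getD b (-1) = i := by rw [hbm, hidm1']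
      have hk0lt : ids'.getD a (-1) < i := by
        rw [← hq2]
        exact hmono' a b hab hb
      have hk0i : ids'.getD a (-1) ≠ i := ne_of_lt hk0lt
      rw [hq2]
      have hnda : (csets'.getD (ids'.getD a (-1)) []).Nodup := (hc4 a (by omega)).1
      have hndi : (csets'.getD i []).Nodup := by
        have := (hc4 m1 (by rw [hCl]; omega)).1
        rwa [hidm1'] at this
      apply pv_foldins_get?_hit
      · refine ⟨ids'.getD a (-1), (hmemF _).mpr ⟨hmem_of_pos a (by omega), hk0i⟩, ?_⟩
        rw [if_pos hk0lt]
      · intro x hx he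
        obtain ⟨hxm, hxi⟩ := (hmemF x).mp hx
        have hxk0 : x = ids'.getD a (-1) := by
          apply hkeyinj x _ hxi hk0i
          rw [he, if_pos hk0lt]
        rw [hxk0]
        exact pv_score_comm _ _ hndi hnda
    · by_cases ham : a = m1
      · have hq1 : ids'.getD a (-1) = i := by rw [ham, hidm1']
        have hk0gt : i < ids'.getD b (-1) := by
          rw [← hq1]
          exact hmono' a b hab hb
        have hk0i : ids'.getD b (-1) ≠ i := (ne_of_lt hk0gt).symm
        rw [hq1]
        apply pv_foldins_get?_hit
        · refine ⟨ids'.getD b (-1), (hmemF _).mpr ⟨hmem_of_pos b hb, hk0i⟩, ?_⟩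
          rw [if_neg (by omega)]
        · intro x hx he
          obtain ⟨hxm, hxi⟩ := (hmemF x).mp hx
          have hxk0 : x = ids'.getD b (-1) := by
            apply hkeyinj x _ hxi hk0i
            rw [he, if_neg (by omega)]
          rw [hxk0]
      · -- neither endpoint is the merged cluster: the cached value is reused
        have hm1L : m1 < L - 1 := by omega
        have hq1i : ids'.getD a (-1) ≠ i := fun he =>
          ham (hposinj' a m1 (by omega) hm1L (he.trans hidm1'.symm))
        have hq2i : ids'.getD b (-1) ≠ i := fun he =>
          hbm (hposinj' b m1 hb hm1L (he.trans hidm1'.symm))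
        have hq1j : ids'.getD a (-1) ≠ j := fun he => hjnot (he ▸ hmem_of_pos a (by omega))
        have hq2j : ids'.getD b (-1) ≠ j := fun he => hjnot (he ▸ hmem_of_pos b hb)
        rw [pv_foldins_get?_miss _ _ _ _ _ ?_, hfilt, if_pos ⟨hq1i, hq2i, hq1j, hq2j⟩]
        · rw [hcun _ hq1i hq1j, hcun _ hq2i hq2j, hids' a (by omega), hids' b hb]
          exact hspos _ _ (by split_ifs <;> omega) (by split_ifs <;> omega)
        · intro x hx he
          obtain ⟨hxm, hxi⟩ := (hmemF x).mp hx
          split_ifs at he with hxlt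
          · rw [Prod.mk.injEq] at he
            exact hq2i he.2.symm
          · rw [Prod.mk.injEq] at he
            exact hq1i he.1.symm
  have hc7 : ∀ q : Int × Int, (∀ a b : Nat, a < b → b < C'.length →
      q ≠ (ids'.getD a (-1), ids'.getD b (-1))) → (pvRebuild ids' csets' score i j).get? q = none := by
    intro q hq
    have hq' : ∀ a b : Nat, a < b → b < L - 1 → q ≠ (ids'.getD a (-1), ids'.getD b (-1)) :=
      fun a b hab hb => hq a b hab (by omega)
    have hm1L : m1 < L - 1 := by omega
    rw [hreb, pv_foldins_get?_miss _ _ _ _ _ ?_, hfilt]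
    · by_cases hcq : q.1 ≠ i ∧ q.2 ≠ i ∧ q.1 ≠ j ∧ q.2 ≠ j
      · rw [if_pos hcq]
        apply hsneg
        intro a b hab hb he
        have hq1 : q.1 = ids.getD a (-1) := by rw [he]
        have hq2 : q.2 = ids.getD b (-1) := by rw [he]
        have ha2 : a ≠ m2 := fun h => hcq.2.2.1 (by rw [hq1, h, ← hj])
        have hb1 : b ≠ m1 := fun h => hcq.2.1 (by rw [hq2, h, ← hi])
        have hb2 : b ≠ m2 := fun h => hcq.2.2.2 (by rw [hq2, h, ← hj])
        have hA : ids'.getD (if a < m2 then a else a - 1) (-1) = ids.getD a (-1) := by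
          by_cases h1 : a < m2
          · rw [if_pos h1, hids' a (by omega), if_pos h1]
          · rw [if_neg h1, hids' (a - 1) (by omega), if_neg (by omega)]
            congr 1
            omega
        have hB : ids'.getD (if b < m2 then b else b - 1) (-1) = ids.getD b (-1) := by
          by_cases h1 : b < m2
          · rw [if_pos h1, hids' b (by omega), if_pos h1]
          · rw [if_neg h1, hids' (b - 1) (by omega), if_neg (by omega)]
            congr 1
            omega
        have hord : (if a < m2 then a else a - 1) < (if b < m2 then b else b - 1) := by
          split_ifs <;> omega
        have hbound : (if b < m2 then b else b - 1) < L - 1 := by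
          split_ifs <;> omega
        exact hq' _ _ hord hbound (by rw [he, hA, hB])
      · rw [if_neg hcq]
    · intro x hx he
      obtain ⟨hxm, hxi⟩ := (hmemF x).mp hx
      obtain ⟨px, hpx, hpxe⟩ := hpos_of_mem x hxm
      have hpxm : px ≠ m1 := fun h => hxi (by rw [← hpxe, h, hidm1'])
      rcases lt_or_gt_of_ne hxi with hlt | hgt
      · have hpxlt : px < m1 := by
          by_contra hcon
          have : i < x := by
            rw [← hidm1', ← hpxe]
            exact hmono' m1 px (by omega) hpx
          omega
        apply hq' px m1 hpxlt hm1L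
        rw [← he, if_pos hlt, hpxe, hidm1']
      · have hpxgt : m1 < px := by
          by_contra hcon
          have : x < i := by
            rw [← hidm1', ← hpxe]
            exact hmono' px m1 (by omega) hm1L
          omega
        apply hq' m1 px hpxgt hpx
        rw [← he, if_neg (by omega), hpxe, hidm1']
  exact ⟨by rw [hlen', hCl], hsorted', hc3, hc4, hc5, hc6, hc7⟩

theorem pvLoopB_stop (active : List Int) (members : PySem.Dict Int (List (List (String × List String))))
    (csets : PySem.Dict Int (List String)) (score : PySem.Dict (Int × Int) Int) (target : Int)
    (hc : ¬ target < (active.length : Int)) :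
    pvLoopB active members csets score target = active.map (fun k => members.getD k []) := by
  rw [pvLoopB, if_neg hc]

theorem pvLoopB_step (active : List Int) (members : PySem.Dict Int (List (List (String × List String))))
    (csets : PySem.Dict Int (List String)) (score : PySem.Dict (Int × Int) Int) (target : Int)
    (ij : Int × Int) (hc : target < (active.length : Int)) (hmk : pvMinKey score = some ij)
    (h : ((PySem.List.remove? active ij.2).getD active).length < active.length) :
    pvLoopB active members csets score target =
      pvLoopB ((PySem.List.remove? active ij.2).getD active)
        ((members.erase ij.2).insert ij.1 (members.getD ij.1 [] ++ members.getD ij.2 []))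
        ((csets.erase ij.2).insert ij.1 (PySem.Set.update (csets.getD ij.1 []) (csets.getD ij.2 [])))
        (pvRebuild ((PySem.List.remove? active ij.2).getD active)
          ((csets.erase ij.2).insert ij.1 (PySem.Set.update (csets.getD ij.1 []) (csets.getD ij.2 [])))
          score ij.1 ij.2) target := by
  rw [pvLoopB, if_pos hc, hmk]
  exact dif_pos h

theorem pv_loop_eqB (target : Int) (ht : 1 ≤ target) :
    ∀ fuel : Nat, ∀ (clusters : List (List (List (String × List String)))) (ids : List Int)
      (members : PySem.Dict Int (List (List (String × List String))))
      (csets : PySem.Dict Int (List String)) (score : PySem.Dict (Int × Int) Int),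
      clusters.length ≤ fuel → pvInv clusters ids members csets score →
      pvLoopA clusters target = pvLoopB ids members csets score target := by
  intro fuel
  induction fuel with
  | zero =>
    intro clusters ids members csets score hn hinv
    obtain ⟨hlen, _, hmem, _⟩ := hinv
    have h0 : clusters.length = 0 := by omega
    rw [pvLoopA, if_neg (by rw [h0]; omega),
      pvLoopB_stop _ _ _ _ _ (by rw [hlen, h0]; omega)]
    exact (pv_assemble _ _ _ hlen hmem).symm
  | succ n ih =>
    intro clusters ids members csets score hn hinv
    have hlen := hinv.1
    by_cases hc : target < (clusters.length : Int)
    · have h2 : 2 ≤ clusters.length := by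
        by_contra hcon
        interval_cases h : clusters.length <;> simp_all <;> omega
      obtain ⟨m, hm12, hm2, hA, hB⟩ := pv_best_link _ _ _ _ _ hinv h2
      have hm2ids : m.2 < ids.length := by omega
      have hnodup_ids : ids.Nodup := hinv.2.1.imp (fun h => ne_of_lt h)
      have hrm : (PySem.List.remove? ids (ids.getD m.2 (-1))).getD ids = ids.eraseIdx m.2 := by
        rw [List.getD_eq_getElem _ _ hm2ids,
          PySem.List.remove?_eq_some_erase ids _ (List.getElem_mem _), Option.getD_some]
        exact List.Nodup.erase_getElem hnodup_ids m.2 hm2ids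
      have hrmlen : ((PySem.List.remove? ids (ids.getD m.2 (-1))).getD ids).length < ids.length := by
        rw [hrm, List.length_eraseIdx_of_lt hm2ids]
        omega
      have hAstep : pvLoopA clusters target = pvLoopA (pvMergeA clusters m.1 m.2) target := by
        conv_lhs => rw [pvLoopA]
        rw [if_pos hc, hA]
        exact dif_pos (by
          show (pvMergeA clusters m.1 m.2).length < clusters.length
          rw [pv_mergeA_length _ _ _ hm2]
          omega)
      have hBstep := pvLoopB_step ids members csets score target
        (ids.getD m.1 (-1), ids.getD m.2 (-1)) (by rw [hlen]; exact hc) hB hrmlen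
      rw [hrm] at hBstep
      rw [hAstep, hBstep]
      apply ih
      · rw [pv_mergeA_length _ _ _ hm2]
        omega
      · exact pv_step_inv _ _ _ _ _ m.1 m.2 hinv hm12 hm2
    · rw [pvLoopA, if_neg hc, pvLoopB_stop _ _ _ _ _ (by rw [hlen]; exact hc)]
      exact (pv_assemble _ _ _ hlen hinv.2.2.1).symm

-- under Pre_ with nonempty analyses the target is at least 1
theorem pv_target_ge (analyses : List (List (String × List String))) (n_clusters : Option Int)
    (hp : 0 ≤ n_clusters.getD 0) : 1 ≤ pvTarget analyses n_clusters := by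
  unfold pvTarget
  cases n_clusters with
  | none =>
    show 1 ≤ max 2 (min (PySem.Int.floordiv (analyses.length : Int) 3) 7)
    omega
  | some k =>
    simp only [Option.getD_some] at hp
    show 1 ≤ if k = 0 then max 2 (min (PySem.Int.floordiv (analyses.length : Int) 3) 7) else k
    by_cases hk : k = 0
    · rw [if_pos hk]; omega
    · rw [if_neg hk]; omega

theorem pv_init (analyses : List (List (String × List String))) :
    pvInv (analyses.map (fun a => [a]))
      (PySem.List.pyRange 0 (analyses.length : Int))
      ((PySem.List.enumerate analyses).foldl (fun d ka => d.insert ka.1 [ka.2]) PySem.Dict.empty)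
      ((PySem.List.enumerate analyses).foldl
        (fun d ka => d.insert ka.1 (PySem.Set.ofList (pvConcepts ka.2))) PySem.Dict.empty)
      ((PySem.List.pyRange 0 (analyses.length : Int)).foldl (fun d x =>
        (PySem.List.pyRange (x+1) (analyses.length : Int)).foldl (fun d y =>
          d.insert (x, y) (pvScore (((PySem.List.enumerate analyses).foldl
            (fun d ka => d.insert ka.1 (PySem.Set.ofList (pvConcepts ka.2))) PySem.Dict.empty).getD x [])
            (((PySem.List.enumerate analyses).foldl
            (fun d ka => d.insert ka.1 (PySem.Set.ofList (pvConcepts ka.2))) PySem.Dict.empty).getD y []))) d)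
        PySem.Dict.empty) := by
  set n := analyses.length with hn
  set ids0 := PySem.List.pyRange 0 (n : Int) with hids0
  set csets0 := (PySem.List.enumerate analyses).foldl
    (fun d ka => d.insert ka.1 (PySem.Set.ofList (pvConcepts ka.2))) PySem.Dict.empty with hcsets0
  have hlen0 : ids0.length = n := by
    rw [hids0, PySem.List.pyRange_zero_natCast, List.length_map, List.length_range]
  have hget0 : ∀ k : Nat, k < n → ids0.getD k (-1) = (k : Int) := by
    intro k hk
    rw [hids0, PySem.List.pyRange_zero_natCast,
      List.getD_eq_getElem _ _ (by simpa using hk), List.getElem_map, List.getElem_range]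
  have hsort0 : ids0.Pairwise (· < ·) := by
    rw [hids0, PySem.List.pyRange_zero_natCast, List.pairwise_map]
    exact List.pairwise_lt_range.imp (fun h => by exact_mod_cast h)
  have hclus0 : ∀ k : Nat, (h : k < n) → (analyses.map (fun a => [a])).getD k [] = [analyses[k]] := by
    intro k hk
    rw [List.getD_eq_getElem _ _ (by simpa using hk), List.getElem_map]
  have henum : ∀ p, p ∈ PySem.List.enumerate analyses 0 ↔
      ∃ t : Nat, ∃ h : t < n, p = ((t : Int), analyses[t]) := by
    intro p
    rw [pv_enumerate_mem]
    constructor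
    · rintro ⟨t, h, rfl⟩
      exact ⟨t, h, by rw [zero_add]⟩
    · rintro ⟨t, h, rfl⟩
      exact ⟨t, h, by rw [zero_add]⟩
  have hmem0 : ∀ k : Nat, (h : k < n) →
      ((PySem.List.enumerate analyses).foldl (fun d ka => d.insert ka.1 [ka.2])
        PySem.Dict.empty).get? (k : Int) = some [analyses[k]] := by
    intro k hk
    apply pv_foldins_get?_hit
    · exact ⟨((k : Int), analyses[k]), (henum _).mpr ⟨k, hk, rfl⟩, rfl⟩
    · intro x hx he
      obtain ⟨t, ht, rfl⟩ := (henum x).mp hx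
      have he' : (t : Int) = (k : Int) := he
      have : t = k := by exact_mod_cast he'
      subst this
      rfl
  have hcs0 : ∀ k : Nat, (h : k < n) →
      csets0.get? (k : Int) = some (PySem.Set.ofList (pvConcepts analyses[k])) := by
    intro k hk
    apply pv_foldins_get?_hit
    · exact ⟨((k : Int), analyses[k]), (henum _).mpr ⟨k, hk, rfl⟩, rfl⟩
    · intro x hx he
      obtain ⟨t, ht, rfl⟩ := (henum x).mp hx
      have he' : (t : Int) = (k : Int) := he
      have : t = k := by exact_mod_cast he'
      subst this
      rfl
  -- the flattened pair list of the initial score table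
  set LP := (PySem.List.pyRange 0 (n : Int)).flatMap
    (fun x => (PySem.List.pyRange (x+1) (n : Int)).map (fun y => (x, y))) with hLP
  have hLPm : ∀ p : Int × Int, p ∈ LP ↔ 0 ≤ p.1 ∧ p.1 < p.2 ∧ p.2 < (n : Int) := by
    intro p
    rw [hLP, List.mem_flatMap]
    constructor
    · rintro ⟨x, hx, hp⟩
      rw [List.mem_map] at hp
      obtain ⟨y, hy, rfl⟩ := hp
      rw [PySem.List.mem_pyRange_one] at hx hy
      exact ⟨by omega, by simpa using ⟨by omega, by omega⟩⟩
    · rintro ⟨h0, h12, h2⟩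
      refine ⟨p.1, PySem.List.mem_pyRange_one.mpr ⟨h0, by omega⟩,
        List.mem_map.mpr ⟨p.2, PySem.List.mem_pyRange_one.mpr ⟨by omega, h2⟩, rfl⟩⟩
  have hflat : (PySem.List.pyRange 0 (n : Int)).foldl (fun d x =>
      (PySem.List.pyRange (x+1) (n : Int)).foldl (fun d y =>
        d.insert (x, y) (pvScore (csets0.getD x []) (csets0.getD y []))) d)
      PySem.Dict.empty
      = LP.foldl (fun d p => d.insert p (pvScore (csets0.getD p.1 []) (csets0.getD p.2 [])))
          PySem.Dict.empty := by
    rw [hLP, List.foldl_flatMap]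
    apply PySem.List.foldl_congr_mem
    intro acc x _
    rw [List.foldl_map]
  refine ⟨by rw [hlen0, List.length_map], hsort0, ?_, ?_, ?_, ?_, ?_⟩
  · intro k hk
    rw [List.length_map] at hk
    rw [hget0 k hk, hclus0 k hk]
    exact hmem0 k hk
  · intro k hk
    rw [List.length_map] at hk
    rw [hget0 k hk, hclus0 k hk,
      PySem.Dict.getD_of_get?_eq_some _ _ (hcs0 k hk)]
    constructor
    · exact PySem.Set.nodup_ofList _
    · intro x
      rw [PySem.Set.mem_ofList, pv_mem_cc]
      simp
  · rw [hflat, PySem.Dict.keys_foldl_insert_key]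
    show (PySem.Set.update ([] : List (Int × Int)) _).Nodup
    rw [PySem.Set.update_nil_left]
    exact PySem.Set.nodup_ofList _
  · intro a b hab hb
    rw [List.length_map] at hb
    rw [hflat, hget0 a (by omega), hget0 b hb]
    apply pv_foldins_get?_hit _ (fun p => p) _ _ _ _
    · exact ⟨((a : Int), (b : Int)), (hLPm _).mpr ⟨by omega, by show (a:Int) < (b:Int); exact_mod_cast hab, by show (b:Int) < (n:Int); exact_mod_cast hb⟩, rfl⟩
    · intro x hx he
      rw [he]
  · intro q hq
    rw [List.length_map] at hq
    rw [hflat, pv_foldins_get?_miss _ (fun p => p) _ _ _ ?_]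
    · rfl
    · intro x hx he
      obtain ⟨h0, h12, h2⟩ := (hLPm x).mp hx
      apply hq x.1.toNat x.2.toNat (by omega) (by omega)
      rw [← he, hget0 x.1.toNat (by omega), hget0 x.2.toNat (by omega)]
      rw [Prod.ext_iff]
      constructor <;> simp <;> omega

-- ===== VERDICT (by name: the statement is the Claim_ definition above) =====
theorem cluster_by_concepts_py_spec : Claim_equal_cluster_by_concepts_py := by
  intro analyses n_clusters _ hpre
  unfold Spec_cluster_by_concepts_py
  unfold cluster_by_concepts_py cluster_by_concepts_py_alt
  by_cases he : analyses.isEmpty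
  · rw [if_pos he, if_pos he]
  · rw [if_neg he, if_neg he]
    have hpre' : 0 ≤ n_clusters.getD 0 := by
      rcases hpre with h | h
      · rw [h] at he; simp at he
      · exact h
    show pvLoopA _ _ = pvLoopB _ _ _ _ _
    exact pv_loop_eqB _ (pv_target_ge analyses n_clusters hpre') analyses.length
      _ _ _ _ _ (by simp) (pv_init analyses)
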